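-- pv_equiv track=rewrite | github.com/orthonormalize/dakota | dakotaLib.py | buildDict_StarterSubstrings
-- ===== SOURCE A (Python) =====
-- def buildDict_StarterSubstrings(L):
--     # input must be list-like and already sorted
--     # output: dict of possible extensions
--         # key: a word in L
--         # value: list of all other words in L that are starter substrings of the key
--     L=list(L)
--     D={}
--     cur=[]
--     dex=0
--     while (dex<len(L)):
--         thisword = L[dex]
--         while (cur):
--             if(not(thisword.startswith(cur[-1]))):
--                 cur.pop()
--             else:
--                 D[thisword]=[x for x in cur]
--                 break
--         cur.append(L[dex])
--         dex+=1
--     return D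
-- ===== SOURCE B (Python) =====
-- def buildDict_StarterSubstrings(L):
--     # Direct nested re-scan: for each word, collect all strictly earlier words
--     # in the (sorted) list that are starter substrings of it.
--     L = list(L)
--     D = {}
--     for i, w in enumerate(L):
--         P = [x for x in L[:i] if w.startswith(x)]
--         if P:
--             D[w] = P
--     return D
-- ===== Notes on version B (the rewrite author's own statement) =====
-- stated objective: simpler
-- what changed: Replaces A's amortized prefix-chain stack (inner pop loop over a maintained stack) with a direct nested re-scan: for each word, filter the strictly earlier portion of the list for starter substrings; Pre_ excludes lists violating prefix interpolation (a word is a starter of a later word but not of a word between them, impossible in A's documented sorted-input domain), where A's stack has already popped starters B still sees.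
-- outside the precondition, e.g. on buildDict_StarterSubstrings(['ab', 'b', 'a', 'abc']): A returns {'abc': ['a']}, B returns {'abc': ['ab', 'a']}
import Mathlib
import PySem

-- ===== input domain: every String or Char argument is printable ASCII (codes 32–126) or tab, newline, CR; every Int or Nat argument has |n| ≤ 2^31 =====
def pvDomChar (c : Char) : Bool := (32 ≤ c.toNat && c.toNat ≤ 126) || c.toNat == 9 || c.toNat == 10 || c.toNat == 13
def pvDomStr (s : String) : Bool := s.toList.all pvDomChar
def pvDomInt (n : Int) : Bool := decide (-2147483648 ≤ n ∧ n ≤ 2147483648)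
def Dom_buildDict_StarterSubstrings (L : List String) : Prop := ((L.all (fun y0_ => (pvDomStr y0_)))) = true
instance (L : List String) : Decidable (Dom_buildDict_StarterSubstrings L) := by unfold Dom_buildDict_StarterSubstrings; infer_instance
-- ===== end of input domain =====

-- B replaces A's amortized prefix-chain stack with a direct nested re-scan of the
-- earlier portion of the list (simpler, not faster; equal on sorted input = A's documented domain).

-- ===== PORT A =====
-- A's inner 'while cur: if not thisword.startswith(cur[-1]): cur.pop() else: D[thisword]=[x for x in cur]; break'.
-- The Python stack 'cur' is stored REVERSED here (head = Python's cur[-1]); '[x for x in cur]' is therefore '.reverse'.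
def pvInnerA (w : String) (D : PySem.Dict String (List String)) (cur : List String) :
    PySem.Dict String (List String) × List String :=
  match cur with
  | [] => (D, [])
  | c :: rest =>
    if PySem.Str.startswith w c = false then pvInnerA w D rest
    else (D.insert w ((c :: rest).reverse), c :: rest)

-- A's outer 'while dex < len(L)' loop over the remaining words, carrying D and the stack.
def pvLoopA (rest : List String) (D : PySem.Dict String (List String)) (cur : List String) :
    PySem.Dict String (List String) :=
  match rest with
  | [] => D
  | w :: ws =>
    let r := pvInnerA w D cur
    pvLoopA ws r.1 (w :: r.2)

def buildDict_StarterSubstrings (L : List String) : List (String × List String) :=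
  (pvLoopA L PySem.Dict.empty []).items

-- ===== PORT B =====
-- 'for i, w in enumerate(L): P = [x for x in L[:i] if w.startswith(x)]; if P: D[w] = P'
-- (L[:i] with 0 ≤ i is List.take i).
def pvLoopB (L : List String) (rest : List String) (i : Nat)
    (D : PySem.Dict String (List String)) : PySem.Dict String (List String) :=
  match rest with
  | [] => D
  | w :: ws =>
    let P := (L.take i).filter (fun x => PySem.Str.startswith w x)
    pvLoopB L ws (i + 1) (if P = [] then D else D.insert w P)

def buildDict_StarterSubstrings_alt (L : List String) : List (String × List String) :=
  (pvLoopB L L 0 PySem.Dict.empty).items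

-- ===== PRECONDITION & SPEC =====
-- Pre_ excludes lists that violate prefix interpolation (some word is a starter of a later
-- word but not of a word between them — impossible in a sorted list, A's documented domain):
-- there A's one-pass stack has already popped starters that B's full re-scan still sees.
def Pre_buildDict_StarterSubstrings (L : List String) : Prop :=
  ∀ x ∈ L, ∀ y ∈ L, ∀ z ∈ L, List.Sublist [x, y, z] L →
    PySem.Str.startswith z x = true → PySem.Str.startswith y x = true
instance (L : List String) : Decidable (Pre_buildDict_StarterSubstrings L) := by
  unfold Pre_buildDict_StarterSubstrings; infer_instance

def pvWitness_buildDict_StarterSubstrings : List String := ["a", "ab", "abc", "b"]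

def Spec_buildDict_StarterSubstrings (L : List String) (out : List (String × List String)) : Prop := out = buildDict_StarterSubstrings_alt L
instance (L : List String) (out : List (String × List String)) : Decidable (Spec_buildDict_StarterSubstrings L out) := by unfold Spec_buildDict_StarterSubstrings; infer_instance

-- ===== CLAIM (what is proved, stated in full; the proofs are below) =====
def Claim_equal_buildDict_StarterSubstrings : Prop := ∀ (L : List String), Dom_buildDict_StarterSubstrings L → Pre_buildDict_StarterSubstrings L → Spec_buildDict_StarterSubstrings L (buildDict_StarterSubstrings L)

-- ===== LEMMAS AND PROOFS =====

-- startswith is transitive (prefix-of is).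
theorem pv_sw_trans {a b c : String} (h1 : PySem.Str.startswith a b = true)
    (h2 : PySem.Str.startswith b c = true) : PySem.Str.startswith a c = true := by
  simp only [PySem.Str.startswith_eq, PySem.Chars.startswith_iff] at *
  exact h2.trans h1

-- A's inner pop loop on a prefix chain returns the filtered stack.
theorem pv_inner_spec (w : String) (D : PySem.Dict String (List String)) (cur : List String)
    (hch : cur.Pairwise (fun a b => PySem.Str.startswith a b = true)) :
    pvInnerA w D cur =
      ((if cur.filter (fun x => PySem.Str.startswith w x) = [] then D
        else D.insert w ((cur.filter (fun x => PySem.Str.startswith w x)).reverse)),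
       cur.filter (fun x => PySem.Str.startswith w x)) := by
  induction cur with
  | nil => simp [pvInnerA]
  | cons c rest ih =>
    rcases List.pairwise_cons.mp hch with ⟨hc, hrest⟩
    by_cases h : PySem.Str.startswith w c = true
    · have hall : rest.filter (fun x => PySem.Str.startswith w x) = rest :=
        List.filter_eq_self.mpr (fun x hx => pv_sw_trans h (hc x hx))
      simp only [pvInnerA, List.filter_cons, h, hall]
      norm_num
      exact fun hcon => absurd hcon (List.cons_ne_nil c rest)
    · have h' : PySem.Str.startswith w c = false := by simpa using h
      simp only [pvInnerA, List.filter_cons, h', ih hrest]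
      norm_num

-- Main invariant: with p already processed and 'cur' holding exactly the surviving
-- starters (reversed), A's remaining loop equals B's loop starting at index p.length.
theorem pv_loop_eq (rest : List String) : ∀ (p : List String)
    (D : PySem.Dict String (List String)) (cur : List String),
    cur.Pairwise (fun a b => PySem.Str.startswith a b = true) →
    (∀ x ∈ cur, x ∈ p) →
    (∀ x ∈ p, ∀ y z : String, List.Sublist [y, z] rest →
      PySem.Str.startswith z x = true → PySem.Str.startswith y x = true) →
    (∀ x y z : String, List.Sublist [x, y, z] rest →
      PySem.Str.startswith z x = true → PySem.Str.startswith y x = true) →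
    (∀ w ∈ rest, (cur.filter (fun x => PySem.Str.startswith w x)).reverse
        = p.filter (fun x => PySem.Str.startswith w x)) →
    pvLoopA rest D cur = pvLoopB (p ++ rest) rest p.length D := by
  induction rest with
  | nil => intro p D cur _ _ _ _ _; simp [pvLoopA, pvLoopB]
  | cons w ws ih =>
    intro p D cur hch hmem hkey1 hkey2 hfilt
    have hPrev := hfilt w (List.mem_cons_self ..)
    set F := cur.filter (fun x => PySem.Str.startswith w x) with hF
    set P := p.filter (fun x => PySem.Str.startswith w x) with hP
    have hFP : F = [] ↔ P = [] := by
      constructor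
      · intro h; rw [← hPrev, h]; rfl
      · intro h; have := hPrev; rw [h] at this; simpa using this
    -- rewrite A's one step via the inner-loop spec
    have hstep : pvLoopA (w :: ws) D cur
        = pvLoopA ws (if P = [] then D else D.insert w P) (w :: F) := by
      show pvLoopA ws (pvInnerA w D cur).1 (w :: (pvInnerA w D cur).2) = _
      rw [pv_inner_spec w D cur hch]
      simp only [← hF, hPrev, hFP]
    rw [hstep]
    -- B's one step
    have htake : (p ++ w :: ws).take p.length = p := List.take_left ..
    have hstepB : pvLoopB (p ++ w :: ws) (w :: ws) p.length D
        = pvLoopB (p ++ w :: ws) ws (p.length + 1) (if P = [] then D else D.insert w P) := by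
      show pvLoopB _ ws _ (if ((p ++ w :: ws).take p.length).filter _ = [] then _ else _) = _
      rw [htake]
    rw [hstepB]
    have hassoc : p ++ w :: ws = (p ++ [w]) ++ ws := by simp
    have hlen : (p ++ [w]).length = p.length + 1 := by simp
    rw [hassoc, ← hlen]
    -- surviving starters of any x ∈ p are unchanged by the extra filter through w
    have hFF : ∀ v ∈ ws, F.filter (fun x => PySem.Str.startswith v x)
        = cur.filter (fun x => PySem.Str.startswith v x) := by
      intro v hvmem
      rw [hF, List.filter_filter]
      apply List.filter_congr
      intro x hx
      by_cases hvx : PySem.Str.startswith v x = true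
      · have hsub : List.Sublist [w, v] (w :: ws) :=
          List.Sublist.cons₂ w (List.singleton_sublist.mpr hvmem)
        rw [hvx, hkey1 x (hmem x hx) w v hsub hvx]; rfl
      · rw [Bool.eq_false_iff.mpr hvx, Bool.false_and]
    apply ih (p ++ [w]) _ (w :: F)
    · refine List.pairwise_cons.mpr ⟨?_, ?_⟩
      · intro x hx; exact (List.mem_filter.mp hx).2
      · exact hch.sublist List.filter_sublist
    · intro x hx
      rcases List.mem_cons.mp hx with h | h
      · simp [h]
      · exact List.mem_append_left [w] (hmem x (List.filter_sublist.mem h))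
    · intro x hxmem y z hsub hzx
      rcases List.mem_append.mp hxmem with hxp | hxw
      · exact hkey1 x hxp y z (hsub.cons w) hzx
      · have hxw : x = w := by simpa using hxw
        subst hxw
        exact hkey2 x y z (List.Sublist.cons₂ x hsub) hzx
    · intro x y z hsub hzx
      exact hkey2 x y z (hsub.cons w) hzx
    · intro v hvmem
      by_cases hvw : PySem.Str.startswith v w = true
      · have : (w :: F).filter (fun x => PySem.Str.startswith v x)
            = w :: cur.filter (fun x => PySem.Str.startswith v x) := by
          rw [List.filter_cons, if_pos (by simpa using hvw), hFF v hvmem]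
        rw [this]
        simp only [List.reverse_cons, hfilt v (List.mem_cons_of_mem w hvmem),
          List.filter_append, List.filter_cons, hvw, List.filter_nil]
        rfl
      · have hvw' : PySem.Str.startswith v w = false := by simpa using hvw
        rw [List.filter_cons, if_neg (by simpa using hvw'), hFF v hvmem,
          hfilt v (List.mem_cons_of_mem w hvmem), List.filter_append, List.filter_cons, hvw']
        simp

-- ===== VERDICT (by name: the statement is the Claim_ definition above) =====
theorem buildDict_StarterSubstrings_spec : Claim_equal_buildDict_StarterSubstrings := by
  intro L _ hpre
  unfold Spec_buildDict_StarterSubstrings buildDict_StarterSubstrings buildDict_StarterSubstrings_alt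
  have hkey2 : ∀ x y z : String, List.Sublist [x, y, z] L →
      PySem.Str.startswith z x = true → PySem.Str.startswith y x = true := by
    intro x y z hsub hzx
    exact hpre x (hsub.subset (by simp)) y (hsub.subset (by simp)) z (hsub.subset (by simp)) hsub hzx
  have := pv_loop_eq L [] PySem.Dict.empty []
    (by simp) (by simp) (by simp) hkey2 (by intro w _; simp)
  simp only [List.nil_append, List.length_nil] at this
  rw [this]
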